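-- pv_equiv track=rewrite | github.com/vibhorgupta-gh/bms-poc | fraud/string_similarity_calculator.py | distance_matrices
-- ===== SOURCE A (Python) =====
-- def distance_matrices(new_pair,final_pair):
--
-- 	new_s1 = new_pair[0]
-- 	final_s1 = final_pair[0]
-- 	l1 = []
-- 	for i in new_s1:
-- 		if i not in l1:
-- 			l1.append(i)
-- 	dist_dic_1 = {}
-- 	l1_1 = l1 + [')']
-- 	dist_dic_1['('] = {}
-- 	for i in l1_1:
-- 		dist_dic_1['('][i] = -1
-- 	for i in l1:
-- 		dist_dic_1[i] = {}
-- 		for j in l1_1: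
-- 			dist_dic_1[i][j] = -1
-- 	k = 0
-- 	while (k<len(final_s1)):
-- 		if ord(final_s1[k])>=48 and ord(final_s1[k])<=57:
-- 			k = k+1
-- 		else:
-- 			j = k+1
-- 			dist_till_now = 0
-- 			dist = 0
-- 			while (j<len(final_s1)):
-- 				if ord(final_s1[j])>=48 and ord(final_s1[j])<=57:
-- 					dist = dist*10 + int(final_s1[j])
-- 					j=j+1
-- 				else:
-- 					dist_till_now += dist
-- 					dist = 0
-- 					if dist_dic_1[final_s1[k]][final_s1[j]]==-1 or dist_dic_1[final_s1[k]][final_s1[j]]>dist_till_now: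
-- 						dist_dic_1[final_s1[k]][final_s1[j]] = dist_till_now
-- 					j=j+1
-- 			k=k+1
--
--
-- 	new_s2 = new_pair[1]
-- 	final_s2 = final_pair[1]
-- 	l2 = []
-- 	for i in new_s2:
-- 		if i not in l2:
-- 			l2.append(i)
-- 	dist_dic_2 = {}
-- 	l2_2 = l2 + [')']
-- 	dist_dic_2['('] = {}
-- 	for i in l2_2:
-- 		dist_dic_2['('][i] = -1
-- 	for i in l2:
-- 		dist_dic_2[i] = {}
-- 		for j in l2_2:
-- 			dist_dic_2[i][j] = -1
-- 	k = 0
-- 	while (k<len(final_s2)):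
-- 		if ord(final_s2[k])>=48 and ord(final_s2[k])<=57:
-- 			k = k+1
-- 		else:
-- 			j = k+1
-- 			dist_till_now = 0
-- 			dist = 0
-- 			while (j<len(final_s2)):
-- 				if ord(final_s2[j])>=48 and ord(final_s2[j])<=57:
-- 					dist = dist*10 + int(final_s2[j])
-- 					j=j+1
-- 				else:
-- 					dist_till_now += dist
-- 					dist = 0
-- 					if dist_dic_2[final_s2[k]][final_s2[j]]==-1 or dist_dic_2[final_s2[k]][final_s2[j]]>dist_till_now:
-- 						dist_dic_2[final_s2[k]][final_s2[j]] = dist_till_now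
-- 					j=j+1
-- 			k=k+1
--
-- 	# print dist_dic_2
-- 	return (dist_dic_1,dist_dic_2)
-- ===== SOURCE B (Python) =====
-- def distance_matrices(new_pair, final_pair):
--     def one(new_s, final_s):
--         # distinct characters of new_s, first occurrence order
--         cols = list(dict.fromkeys(new_s))
--         col_keys = cols if ')' in cols else cols + [')']
--         rows = ['('] + [c for c in cols if c != '(']
--         # tokenize final_s once: (char, prefix sum of the numbers before it)
--         events = []
--         s = 0
--         num = 0
--         for ch in final_s:
--             if '0' <= ch <= '9':
--                 num = num * 10 + (ord(ch) - 48)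
--             else:
--                 s += num
--                 num = 0
--                 events.append((ch, s))
--         # minimum distance per ordered character pair, via prefix-sum differences
--         best = {}
--         rest = events
--         for a, sa in events:
--             rest = rest[1:]
--             for b, sb in rest:
--                 d = sb - sa
--                 if (a, b) not in best or best[(a, b)] > d:
--                     best[(a, b)] = d
--         return {r: {c: best.get((r, c), -1) for c in col_keys} for r in rows}
--     return (one(new_pair[0], final_pair[0]), one(new_pair[1], final_pair[1]))
-- ===== Notes on version B (the rewrite author's own statement) =====
-- stated objective: alternative
-- what changed: A rescans and re-parses the digit runs of each final string from every non-digit position (quadratic in the string length, mutating a pre-initialised nested dict); B tokenizes each final string once into (char, prefix-sum) events and takes minima of pairwise prefix-sum differences into a flat pair-keyed dict, building the output dicts at the end.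
import Mathlib
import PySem

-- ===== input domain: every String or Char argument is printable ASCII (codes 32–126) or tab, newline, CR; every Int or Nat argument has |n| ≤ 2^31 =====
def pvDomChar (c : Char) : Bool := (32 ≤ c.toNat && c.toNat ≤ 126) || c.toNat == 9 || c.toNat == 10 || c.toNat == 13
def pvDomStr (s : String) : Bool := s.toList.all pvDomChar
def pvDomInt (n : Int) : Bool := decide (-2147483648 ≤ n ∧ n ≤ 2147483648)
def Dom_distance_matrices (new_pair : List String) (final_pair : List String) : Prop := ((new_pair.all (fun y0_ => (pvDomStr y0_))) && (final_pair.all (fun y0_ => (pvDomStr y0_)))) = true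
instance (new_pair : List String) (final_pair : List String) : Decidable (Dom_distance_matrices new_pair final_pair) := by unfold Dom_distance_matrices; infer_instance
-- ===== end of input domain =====

-- B re-implements A's quadratic per-position rescanning by one tokenization pass into
-- (char, prefix-sum) events plus pairwise prefix-sum differences; equal return value on Pre_.

-- ===== PORT A =====
-- Python characters are one-character strings; the ports work on Char and wrap the keys
-- into one-character Strings at the very end (exact on every input).
def pvIsDigit (c : Char) : Bool := 48 ≤ c.toNat && c.toNat ≤ 57   -- ord(c)>=48 and ord(c)<=57

def pvDigitVal (c : Char) : Int := (c.toNat : Int) - 48           -- int(c) for a digit character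

-- l1 = []; for i in new_s: if i not in l1: l1.append(i)
def pvDedupA (s : List Char) : List Char :=
  s.foldl (fun l i => if l.contains i then l else l ++ [i]) []

-- dist_dic[i] = {}; for j in l1_1: dist_dic[i][j] = -1
def pvRowA (l1_1 : List Char) : PySem.Dict Char Int :=
  l1_1.foldl (fun r j => r.insert j (-1)) PySem.Dict.empty

-- dist_dic['('] = row over l1_1, then rows for each i in l1
def pvInitA (l1 : List Char) : PySem.Dict Char (PySem.Dict Char Int) :=
  l1.foldl (fun d i => d.insert i (pvRowA (l1 ++ [')'])))
    ((PySem.Dict.empty : PySem.Dict Char (PySem.Dict Char Int)).insert '(' (pvRowA (l1 ++ [')'])))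

-- if dist_dic[a][b]==-1 or dist_dic[a][b]>v: dist_dic[a][b] = v
-- (a missing key is a Python KeyError: excluded by Pre_; the port leaves the dict unchanged there)
def pvUpdA (d : PySem.Dict Char (PySem.Dict Char Int)) (a b : Char) (v : Int) :
    PySem.Dict Char (PySem.Dict Char Int) :=
  match d.get? a with
  | none => d
  | some row =>
    match row.get? b with
    | none => d
    | some cur => if cur = -1 ∨ cur > v then d.insert a (row.insert b v) else d

-- the inner while loop over j = k+1 .. len-1, scanning forward through the remaining characters
def pvInnerA (kc : Char) : List Char → Int → Int → PySem.Dict Char (PySem.Dict Char Int) →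
    PySem.Dict Char (PySem.Dict Char Int)
  | [], _, _, d => d
  | c :: rest, dtn, dist, d =>
    if pvIsDigit c then pvInnerA kc rest dtn (dist * 10 + pvDigitVal c) d
    else pvInnerA kc rest (dtn + dist) 0 (pvUpdA d kc c (dtn + dist))

-- the outer while loop over k, scanning forward through the characters
def pvOuterA : List Char → PySem.Dict Char (PySem.Dict Char Int) →
    PySem.Dict Char (PySem.Dict Char Int)
  | [], d => d
  | c :: rest, d =>
    if pvIsDigit c then pvOuterA rest d
    else pvOuterA rest (pvInnerA c rest 0 0 d)

-- the block A writes out twice, once per component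
def pvHalfA (new_s final_s : String) : List (String × List (String × Int)) :=
  let l1 := pvDedupA new_s.toList
  let dic := pvOuterA final_s.toList (pvInitA l1)
  dic.items.map (fun p => (String.ofList [p.1], p.2.items.map (fun q => (String.ofList [q.1], q.2))))

-- new_pair[0] etc. raise IndexError on short lists: excluded by Pre_; the port takes "" there
def distance_matrices (new_pair : List String) (final_pair : List String) :
    List (List (String × List (String × Int))) :=
  [pvHalfA ((PySem.List.pyGet? new_pair 0).getD "") ((PySem.List.pyGet? final_pair 0).getD ""),
   pvHalfA ((PySem.List.pyGet? new_pair 1).getD "") ((PySem.List.pyGet? final_pair 1).getD "")]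

-- ===== PORT B =====
def pvIsDigitB (c : Char) : Bool := '0' ≤ c && c ≤ '9'

-- one pass over final_s: events = [(ch, prefix sum of completed numbers)], state (events, s, num)
def pvEventsB (final_s : List Char) : List (Char × Int) :=
  (final_s.foldl
    (fun (st : List (Char × Int) × Int × Int) ch =>
      if pvIsDigitB ch then (st.1, st.2.1, st.2.2 * 10 + ((ch.toNat : Int) - 48))
      else (st.1 ++ [(ch, st.2.1 + st.2.2)], st.2.1 + st.2.2, 0))
    ([], 0, 0)).1

-- if (a,b) not in best or best[(a,b)] > d: best[(a,b)] = d
def pvUpdB (best : PySem.Dict (Char × Char) Int) (k : Char × Char) (v : Int) :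
    PySem.Dict (Char × Char) Int :=
  match best.get? k with
  | none => best.insert k v
  | some cur => if cur > v then best.insert k v else best

-- for a,sa in events: rest = rest[1:]; for b,sb in rest: …
def pvPairsB : List (Char × Int) → PySem.Dict (Char × Char) Int → PySem.Dict (Char × Char) Int
  | [], best => best
  | (a, sa) :: rest, best =>
    pvPairsB rest (rest.foldl (fun b q => pvUpdB b (a, q.1) (q.2 - sa)) best)

def pvHalfB (new_s final_s : String) : List (String × List (String × Int)) :=
  let cols := PySem.List.dedup new_s.toList
  let colKeys := if cols.contains ')' then cols else cols ++ [')']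
  let rows := '(' :: cols.filter (fun c => c != '(')
  let best := pvPairsB (pvEventsB final_s.toList) PySem.Dict.empty
  rows.map (fun r => (String.ofList [r], colKeys.map (fun c => (String.ofList [c], best.getD (r, c) (-1)))))

def distance_matrices_alt (new_pair : List String) (final_pair : List String) :
    List (List (String × List (String × Int))) :=
  [pvHalfB ((PySem.List.pyGet? new_pair 0).getD "") ((PySem.List.pyGet? final_pair 0).getD ""),
   pvHalfB ((PySem.List.pyGet? new_pair 1).getD "") ((PySem.List.pyGet? final_pair 1).getD "")]

-- ===== PRECONDITION & SPEC =====
-- Pre_ is exactly the set of inputs on which Python A returns: both lists need two elements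
-- (else IndexError), and in each final string every non-digit character with a later non-digit
-- must be a key row ('(' or a character of new_s) and every non-digit character with an earlier
-- non-digit must be a column key (')' or a character of new_s) — else KeyError.
def pvOkPre (ns fs : String) : Prop :=
  ((fs.toList.filter (fun c => c.toNat < 48 || 57 < c.toNat)).dropLast.all
      (fun c => ns.toList.contains c || c == '(')) = true ∧
  ((fs.toList.filter (fun c => c.toNat < 48 || 57 < c.toNat)).tail.all
      (fun c => ns.toList.contains c || c == ')')) = true

def Pre_distance_matrices (new_pair : List String) (final_pair : List String) : Prop :=
  2 ≤ new_pair.length ∧ 2 ≤ final_pair.length ∧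
  pvOkPre (new_pair.getD 0 "") (final_pair.getD 0 "") ∧
  pvOkPre (new_pair.getD 1 "") (final_pair.getD 1 "")

instance (new_pair : List String) (final_pair : List String) :
    Decidable (Pre_distance_matrices new_pair final_pair) := by
  unfold Pre_distance_matrices pvOkPre; infer_instance

def pvWitness_distance_matrices : List String × List String := (["ab", "cd"], ["a1b", "c2d"])

def Spec_distance_matrices (new_pair : List String) (final_pair : List String)
    (out : List (List (String × List (String × Int)))) : Prop :=
  out = distance_matrices_alt new_pair final_pair

instance (new_pair : List String) (final_pair : List String)
    (out : List (List (String × List (String × Int)))) :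
    Decidable (Spec_distance_matrices new_pair final_pair out) := by
  unfold Spec_distance_matrices; infer_instance

-- ===== CLAIM (what is proved, stated in full; the proofs are below) =====
def Claim_equal_distance_matrices : Prop :=
  ∀ (new_pair : List String) (final_pair : List String),
    Dom_distance_matrices new_pair final_pair →
    Pre_distance_matrices new_pair final_pair →
    Spec_distance_matrices new_pair final_pair (distance_matrices new_pair final_pair)

-- ===== LEMMAS AND PROOFS =====

-- min-update on a cell as A performs it
def pvMinA (x v : Int) : Int := if x = -1 ∨ x > v then v else x

-- min-update on a cell as B performs it
def pvMinB (o : Option Int) (v : Int) : Int :=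
  match o with
  | none => v
  | some cur => if cur > v then v else cur

-- the event list, recursively (S = prefix sum so far, num = number being parsed)
def evR : List Char → Int → Int → List (Char × Int)
  | [], _, _ => []
  | c :: rest, S, num =>
    if pvIsDigit c then evR rest S (num * 10 + pvDigitVal c)
    else (c, S + num) :: evR rest (S + num) 0

-- the ordered sequence of (pair, distance) updates both programs perform
def pvU : List (Char × Int) → List ((Char × Char) × Int)
  | [] => []
  | (a, sa) :: rest => rest.map (fun q => ((a, q.1), q.2 - sa)) ++ pvU rest

-- the "table" dict: fixed row keys, fixed column keys, cell values f r c
def pvTbl (rows cols : List Char) (f : Char → Char → Int) :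
    PySem.Dict Char (PySem.Dict Char Int) :=
  PySem.Dict.mk (rows.map (fun r => (r, PySem.Dict.mk (cols.map (fun c => (c, f r c))))))

lemma pvIsDigitB_eq (c : Char) : pvIsDigitB c = pvIsDigit c := by
  simp only [pvIsDigitB, pvIsDigit, Char.le_def]
  congr 1

lemma pvDedupA_eq (s : List Char) : pvDedupA s = PySem.List.dedup s := by
  rfl

lemma pvEventsB_gen (l : List Char) :
    ∀ (acc : List (Char × Int)) (S num : Int),
      (l.foldl
        (fun (st : List (Char × Int) × Int × Int) ch =>
          if pvIsDigitB ch then (st.1, st.2.1, st.2.2 * 10 + ((ch.toNat : Int) - 48))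
          else (st.1 ++ [(ch, st.2.1 + st.2.2)], st.2.1 + st.2.2, 0))
        (acc, S, num)).1 = acc ++ evR l S num := by
  induction l with
  | nil => intro acc S num; simp [evR]
  | cons c rest ih =>
    intro acc S num
    by_cases h : pvIsDigitB c
    · simp [List.foldl_cons, evR, ← pvIsDigitB_eq, h, pvDigitVal, ih]
    · simp [List.foldl_cons, evR, ← pvIsDigitB_eq, h, ih]

lemma pvEventsB_eq (l : List Char) : pvEventsB l = evR l 0 0 := by
  have := pvEventsB_gen l [] 0 0
  simpa [pvEventsB] using this

lemma evR_shift (l : List Char) :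
    ∀ (S num t : Int), evR l (S + t) num = (evR l S num).map (fun p => (p.1, p.2 + t)) := by
  induction l with
  | nil => intro S num t; simp [evR]
  | cons c rest ih =>
    intro S num t
    by_cases h : pvIsDigit c
    · simp [evR, h, ih]
    · simp only [evR, h, Bool.false_eq_true, if_false, List.map_cons]
      rw [show S + t + num = (S + num) + t by ring, ih]

lemma pvU_shift (t : Int) (l : List (Char × Int)) :
    pvU (l.map (fun p => (p.1, p.2 + t))) = pvU l := by
  induction l with
  | nil => simp [pvU]
  | cons p rest ih =>
    obtain ⟨a, sa⟩ := p
    simp only [List.map_cons, pvU, ih, List.map_map]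
    congr 1
    apply List.map_congr_left
    intro q _
    simp only [Function.comp]
    congr 1
    ring

lemma pvU_indep (l : List Char) :
    ∀ (S num S' num' : Int), pvU (evR l S num) = pvU (evR l S' num') := by
  induction l with
  | nil => intro S num S' num'; simp [evR]
  | cons c rest ih =>
    intro S num S' num'
    by_cases h : pvIsDigit c
    · simp only [evR, h, if_true]
      exact ih _ _ _ _
    · simp only [evR, h, Bool.false_eq_true, if_false]
      have hsh : evR rest (S + num) 0 =
          (evR rest (S' + num') 0).map (fun p => (p.1, p.2 + ((S + num) - (S' + num')))) := by
        rw [← evR_shift]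
        congr 1
        ring
      simp only [pvU, hsh, pvU_shift, List.map_map]
      congr 1
      apply List.map_congr_left
      intro q _
      simp only [Function.comp]
      congr 1
      ring

lemma pvInnerA_eq (kc : Char) (l : List Char) :
    ∀ (dtn dist : Int) (d : PySem.Dict Char (PySem.Dict Char Int)),
      pvInnerA kc l dtn dist d =
        (evR l dtn dist).foldl (fun d q => pvUpdA d kc q.1 q.2) d := by
  induction l with
  | nil => intro dtn dist d; simp [pvInnerA, evR]
  | cons c rest ih =>
    intro dtn dist d
    by_cases h : pvIsDigit c
    · simp [pvInnerA, evR, h, ih]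
    · simp [pvInnerA, evR, h, ih]

lemma pvOuterA_eq (l : List Char) :
    ∀ (d : PySem.Dict Char (PySem.Dict Char Int)),
      pvOuterA l d = (pvU (evR l 0 0)).foldl (fun d p => pvUpdA d p.1.1 p.1.2 p.2) d := by
  induction l with
  | nil => intro d; simp [pvOuterA, evR, pvU]
  | cons c rest ih =>
    intro d
    by_cases h : pvIsDigit c
    · simp only [pvOuterA, h, if_true, evR]
      rw [pvU_indep rest 0 (0 * 10 + pvDigitVal c) 0 0]
      exact ih d
    · simp only [pvOuterA, h, Bool.false_eq_true, if_false, evR, pvU]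
      rw [List.foldl_append, List.foldl_map, ih, pvInnerA_eq]
      simp

lemma pvPairsB_eq (evs : List (Char × Int)) :
    ∀ (best : PySem.Dict (Char × Char) Int),
      pvPairsB evs best = (pvU evs).foldl (fun b p => pvUpdB b p.1 p.2) best := by
  induction evs with
  | nil => intro best; simp [pvPairsB, pvU]
  | cons p rest ih =>
    intro best
    obtain ⟨a, sa⟩ := p
    simp [pvPairsB, pvU, List.foldl_append, List.foldl_map, ih]

lemma get?_mk_map {β : Type} (g : Char → β) (l : List Char) (a : Char) :
    (PySem.Dict.mk (l.map (fun r => (r, g r)))).get? a = if a ∈ l then some (g a) else none := by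
  induction l with
  | nil => simp [PySem.Dict.get?]
  | cons r rest ih =>
    rw [List.map_cons, PySem.Dict.get?_mk_cons]
    by_cases h : r = a
    · subst h; simp
    · simp only [List.mem_cons]
      rw [if_neg (by simp [h]), ih]
      by_cases h2 : a ∈ rest
      · simp [h2]
      · simp [h2, Ne.symm h]

lemma pvTbl_congr {rows cols : List Char} {f g : Char → Char → Int}
    (h : ∀ r ∈ rows, ∀ c ∈ cols, f r c = g r c) : pvTbl rows cols f = pvTbl rows cols g := by
  unfold pvTbl
  congr 1
  apply List.map_congr_left
  intro r hr
  congr 1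
  congr 1
  apply List.map_congr_left
  intro c hc
  rw [h r hr c hc]

lemma pvUpdA_tbl (rows cols : List Char) (f : Char → Char → Int) (a b : Char) (v : Int) :
    pvUpdA (pvTbl rows cols f) a b v =
      pvTbl rows cols (fun r c => if r = a ∧ c = b then pvMinA (f a b) v else f r c) := by
  have hget : ∀ (x : Char), (pvTbl rows cols f).get? x =
      if x ∈ rows then some (PySem.Dict.mk (cols.map (fun c => (c, f x c)))) else none := by
    intro x
    exact get?_mk_map (fun r => PySem.Dict.mk (cols.map (fun c => (c, f r c)))) rows x
  unfold pvUpdA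
  by_cases ha : a ∈ rows
  · rw [hget a, if_pos ha]
    have hrow : ∀ (y : Char), (PySem.Dict.mk (cols.map (fun c => (c, f a c)))).get? y =
        if y ∈ cols then some (f a y) else none := by
      intro y
      exact get?_mk_map (fun c => f a c) cols y
    dsimp only
    by_cases hb : b ∈ cols
    · rw [hrow b, if_pos hb]
      dsimp only
      by_cases hcond : f a b = -1 ∨ f a b > v
      · rw [if_pos hcond]
        apply PySem.Dict.ext
        have hcont : (pvTbl rows cols f).contains a = true := by
          rw [PySem.Dict.contains_eq_isSome_get?, hget a, if_pos ha]
          rfl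
        rw [PySem.Dict.items_insert_of_contains _ _ hcont]
        unfold pvTbl
        simp only [List.map_map]
        apply List.map_congr_left
        intro r hr
        by_cases hra : r = a
        · subst hra
          simp only [Function.comp, beq_self_eq_true, if_true]
          have hcontb : (PySem.Dict.mk (cols.map (fun c => (c, f r c)))).contains b = true := by
            rw [PySem.Dict.contains_eq_isSome_get?, hrow b, if_pos hb]
            rfl
          congr 1
          apply PySem.Dict.ext
          rw [PySem.Dict.items_insert_of_contains _ _ hcontb]
          simp only [List.map_map]
          apply List.map_congr_left
          intro c hc
          by_cases hcb : c = b
          · subst hcb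
            simp [pvMinA, hcond]
          · simp [hcb]
        · simp only [Function.comp]
          rw [if_neg (by simp [hra])]
          have : ∀ c, (if r = a ∧ c = b then pvMinA (f a b) v else f r c) = f r c := by
            intro c
            rw [if_neg (by rintro ⟨h1, h2⟩; exact hra h1)]
          simp only [this]
      · rw [if_neg hcond]
        apply pvTbl_congr
        intro r hr c hc
        by_cases hrc : r = a ∧ c = b
        · obtain ⟨rfl, rfl⟩ := hrc
          simp [pvMinA, hcond]
        · rw [if_neg hrc]
    · rw [hrow b, if_neg hb]
      apply pvTbl_congr
      intro r hr c hc
      rw [if_neg (by rintro ⟨h1, h2⟩; exact hb (h2 ▸ hc))]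
  · rw [hget a, if_neg ha]
    apply pvTbl_congr
    intro r hr c hc
    rw [if_neg (by rintro ⟨h1, h2⟩; exact ha (h1 ▸ hr))]

lemma pvFoldA_tbl (L : List ((Char × Char) × Int)) (rows cols : List Char) :
    ∀ (f : Char → Char → Int),
      L.foldl (fun d p => pvUpdA d p.1.1 p.1.2 p.2) (pvTbl rows cols f) =
        pvTbl rows cols (fun r c =>
          L.foldl (fun x p => if p.1 = (r, c) then pvMinA x p.2 else x) (f r c)) := by
  induction L with
  | nil => intro f; simp
  | cons p L ih =>
    intro f
    simp only [List.foldl_cons]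
    rw [pvUpdA_tbl rows cols f p.1.1 p.1.2 p.2, ih]
    congr 1
    funext r c
    by_cases hrc : p.1 = (r, c)
    · have h1 : r = p.1.1 ∧ c = p.1.2 := by rw [hrc]; exact ⟨rfl, rfl⟩
      rw [if_pos hrc, if_pos h1]
      obtain ⟨hr1, hc1⟩ := h1
      rw [← hr1, ← hc1]
    · have h1 : ¬(r = p.1.1 ∧ c = p.1.2) := by
        rintro ⟨hr1, hc1⟩
        exact hrc (Prod.ext hr1.symm hc1.symm)
      rw [if_neg hrc, if_neg h1]

lemma pvRowA_eq (l1 : List Char) (h : l1.Nodup) :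
    pvRowA (l1 ++ [')']) =
      PySem.Dict.mk ((if l1.contains ')' then l1 else l1 ++ [')']).map (fun c => (c, (-1 : Int)))) := by
  unfold pvRowA
  rw [List.foldl_append]
  have hfresh := PySem.Dict.items_foldl_insert_fresh l1 (fun a => a) (fun _ => (-1 : Int))
    PySem.Dict.empty (by intro a _; simp) (by simpa using h)
  have hd1 : l1.foldl (fun r j => r.insert j (-1)) PySem.Dict.empty =
      PySem.Dict.mk (l1.map (fun a => (a, (-1 : Int)))) := by
    apply PySem.Dict.ext
    rw [hfresh]
    simp [PySem.Dict.empty]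
  rw [hd1]
  simp only [List.foldl_cons, List.foldl_nil]
  by_cases hr : ')' ∈ l1
  · have hcont : (PySem.Dict.mk (l1.map (fun a => (a, (-1 : Int))))).contains ')' = true := by
      simpa [PySem.Dict.contains_mk, List.any_map, Function.comp] using hr
    apply PySem.Dict.ext
    rw [PySem.Dict.items_insert_of_contains _ _ hcont]
    have : l1.contains ')' = true := by simpa using hr
    simp only [this, if_true, List.map_map]
    apply List.map_congr_left
    intro a _
    by_cases ha : a = ')'
    · subst ha; simp
    · simp [ha]
  · have hcont : (PySem.Dict.mk (l1.map (fun a => (a, (-1 : Int))))).contains ')' = false := by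
      simp [PySem.Dict.contains_mk, List.any_map, Function.comp]
      exact fun x hx hxx => hr (hxx ▸ hx)
    apply PySem.Dict.ext
    rw [PySem.Dict.items_insert_of_not_contains _ _ hcont]
    have hc2 : l1.contains ')' = false := by simpa using hr
    rw [hc2]
    simp

lemma pvInitA_fold (R : PySem.Dict Char Int) (l : List Char) :
    ∀ (q : List Char), (q ++ l).Nodup → '(' ∉ q →
      l.foldl (fun d i => d.insert i R)
        (PySem.Dict.mk (('(', R) :: q.map (fun i => (i, R)))) =
      PySem.Dict.mk (('(', R) :: ((q ++ l.filter (fun c => c != '(')).map (fun i => (i, R)))) := by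
  induction l with
  | nil => intro q hnd hq; simp
  | cons i t ih =>
    intro q hnd hq
    rw [List.foldl_cons]
    have hiq : i ∉ q := by
      rw [List.nodup_append] at hnd
      exact fun hin => (hnd.2.2 i hin i List.mem_cons_self) rfl
    by_cases hi : i = '('
    · subst hi
      have hcont : (PySem.Dict.mk (('(', R) :: q.map (fun i => (i, R)))).contains '(' = true := by
        simp [PySem.Dict.contains_mk]
      have heq : (PySem.Dict.mk (('(', R) :: q.map (fun i => (i, R)))).insert '(' R =
          PySem.Dict.mk (('(', R) :: q.map (fun i => (i, R))) := by
        apply PySem.Dict.ext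
        rw [PySem.Dict.items_insert_of_contains _ _ hcont]
        simp only [List.map_cons, beq_self_eq_true, if_true, List.map_map]
        congr 1
        apply List.map_congr_left
        intro a ha
        have : a ≠ '(' := fun h => hq (h ▸ ha)
        simp [this]
      rw [heq]
      have hnd' : (q ++ t).Nodup := by
        apply List.Nodup.sublist _ hnd
        exact List.Sublist.append_left (List.sublist_cons_self _ _) q
      rw [ih q hnd' hq]
      simp
    · have hcont : (PySem.Dict.mk (('(', R) :: q.map (fun i => (i, R)))).contains i = false := by
        simp [PySem.Dict.contains_mk, List.any_map, Function.comp]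
        constructor
        · exact fun h => hi h.symm
        · intro x hx hxx
          exact hiq (hxx ▸ hx)
      have heq : (PySem.Dict.mk (('(', R) :: q.map (fun i => (i, R)))).insert i R =
          PySem.Dict.mk (('(', R) :: (q ++ [i]).map (fun i => (i, R))) := by
        apply PySem.Dict.ext
        rw [PySem.Dict.items_insert_of_not_contains _ _ hcont]
        simp
      rw [heq]
      have hnd' : ((q ++ [i]) ++ t).Nodup := by
        rw [List.append_assoc]
        simpa using hnd
      have hq' : '(' ∉ q ++ [i] := by
        simp [hq]
        exact fun h => hi h.symm
      rw [ih (q ++ [i]) hnd' hq']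
      have : (i :: t).filter (fun c => c != '(') = i :: t.filter (fun c => c != '(') := by
        simp [hi]
      rw [this]
      simp

lemma pvInitA_eq (l1 : List Char) (h : l1.Nodup) :
    pvInitA l1 =
      pvTbl ('(' :: l1.filter (fun c => c != '('))
        (if l1.contains ')' then l1 else l1 ++ [')']) (fun _ _ => -1) := by
  unfold pvInitA
  have hstart : (PySem.Dict.empty : PySem.Dict Char (PySem.Dict Char Int)).insert '('
      (pvRowA (l1 ++ [')'])) = PySem.Dict.mk [('(', pvRowA (l1 ++ [')']))] := by
    apply PySem.Dict.ext
    rw [PySem.Dict.items_insert_of_not_contains _ _ (by simp)]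
    simp [PySem.Dict.empty]
  rw [hstart]
  have := pvInitA_fold (pvRowA (l1 ++ [')'])) l1 [] (by simpa using h) (by simp)
  simp only [List.map_nil, List.nil_append] at this
  rw [this, pvRowA_eq l1 h]
  unfold pvTbl
  simp

lemma pvFoldB_get? (L : List ((Char × Char) × Int)) (k : Char × Char) :
    ∀ (best : PySem.Dict (Char × Char) Int),
      (L.foldl (fun b p => pvUpdB b p.1 p.2) best).get? k =
        L.foldl (fun o p => if p.1 = k then some (pvMinB o p.2) else o) (best.get? k) := by
  induction L with
  | nil => intro best; simp
  | cons p L ih =>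
    intro best
    simp only [List.foldl_cons]
    rw [ih]
    congr 1
    unfold pvUpdB
    by_cases hk : p.1 = k
    · rw [if_pos hk]
      cases hbg : best.get? p.1 with
      | none =>
        dsimp only
        rw [PySem.Dict.get?_insert, if_pos hk.symm]
        rw [← hk, hbg]
        rfl
      | some cur =>
        dsimp only
        by_cases hc : cur > p.2
        · rw [if_pos hc, PySem.Dict.get?_insert, if_pos hk.symm]
          rw [← hk, hbg]
          simp [pvMinB, hc]
        · rw [if_neg hc]
          rw [← hk, hbg]
          simp [pvMinB, hc]
    · rw [if_neg hk]
      have hne : k ≠ p.1 := fun h => hk h.symm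
      cases hbg : best.get? p.1 with
      | none =>
        dsimp only
        rw [PySem.Dict.get?_insert_of_ne _ _ hne]
      | some cur =>
        dsimp only
        by_cases hc : cur > p.2
        · rw [if_pos hc, PySem.Dict.get?_insert_of_ne _ _ hne]
        · rw [if_neg hc]

lemma pvCell_eq (L : List ((Char × Char) × Int)) (hL : ∀ p ∈ L, 0 ≤ p.2) (k : Char × Char) :
    ∀ (x : Int) (o : Option Int), (o = none ∧ x = -1) ∨ (o = some x ∧ 0 ≤ x) →
      L.foldl (fun x p => if p.1 = k then pvMinA x p.2 else x) x =
        (L.foldl (fun o p => if p.1 = k then some (pvMinB o p.2) else o) o).getD (-1) := by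
  induction L with
  | nil =>
    rintro x o (⟨rfl, rfl⟩ | ⟨rfl, hx⟩) <;> simp
  | cons p L ih =>
    rintro x o ho
    have hp : 0 ≤ p.2 := hL p List.mem_cons_self
    have hL' : ∀ q ∈ L, 0 ≤ q.2 := fun q hq => hL q (List.mem_cons_of_mem _ hq)
    simp only [List.foldl_cons]
    by_cases hpk : p.1 = k
    · rw [if_pos hpk, if_pos hpk]
      apply ih hL'
      right
      rcases ho with ⟨rfl, rfl⟩ | ⟨rfl, hx⟩
      · constructor
        · simp [pvMinA, pvMinB]
        · have he : pvMinA (-1) p.2 = p.2 := by simp [pvMinA]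
          rw [he]
          exact hp
      · constructor
        · have hx1 : ¬(x = -1) := by omega
          simp only [pvMinA, pvMinB, hx1, false_or]
        · simp only [pvMinA]
          split_ifs <;> omega
    · rw [if_neg hpk, if_neg hpk]
      exact ih hL' x o ho

lemma evR_lb (l : List Char) :
    ∀ (S num : Int), 0 ≤ num → ∀ q ∈ evR l S num, S + num ≤ q.2 := by
  induction l with
  | nil => intro S num _ q hq; simp [evR] at hq
  | cons c rest ih =>
    intro S num hnum q hq
    by_cases h : pvIsDigit c
    · simp only [evR, h, if_true] at hq
      have hc : (48 : Int) ≤ (c.toNat : Int) := by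
        simp only [pvIsDigit, Bool.and_eq_true, decide_eq_true_eq] at h
        exact_mod_cast h.1
      have hv : 0 ≤ pvDigitVal c := by unfold pvDigitVal; omega
      have := ih S (num * 10 + pvDigitVal c) (by omega) q hq
      omega
    · simp only [evR, h, Bool.false_eq_true, if_false, List.mem_cons] at hq
      rcases hq with rfl | hq
      · simp
      · have := ih (S + num) 0 le_rfl q hq
        omega

lemma evR_pairwise (l : List Char) :
    ∀ (S num : Int), 0 ≤ num → (evR l S num).Pairwise (fun p q => p.2 ≤ q.2) := by
  induction l with
  | nil => intro S num _; simp [evR]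
  | cons c rest ih =>
    intro S num hnum
    by_cases h : pvIsDigit c
    · simp only [evR, h, if_true]
      have hc : (48 : Int) ≤ (c.toNat : Int) := by
        simp only [pvIsDigit, Bool.and_eq_true, decide_eq_true_eq] at h
        exact_mod_cast h.1
      have hv : 0 ≤ pvDigitVal c := by unfold pvDigitVal; omega
      exact ih S (num * 10 + pvDigitVal c) (by omega)
    · simp only [evR, h, Bool.false_eq_true, if_false]
      refine List.Pairwise.cons ?_ (ih (S + num) 0 le_rfl)
      intro q hq
      have := evR_lb rest (S + num) 0 le_rfl q hq
      simpa using this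

lemma pvU_nonneg (evs : List (Char × Int)) (h : evs.Pairwise (fun p q => p.2 ≤ q.2)) :
    ∀ p ∈ pvU evs, 0 ≤ p.2 := by
  induction evs with
  | nil => intro p hp; simp [pvU] at hp
  | cons e rest ih =>
    intro p hp
    obtain ⟨a, sa⟩ := e
    rw [List.pairwise_cons] at h
    simp only [pvU, List.mem_append, List.mem_map] at hp
    rcases hp with ⟨q, hq, rfl⟩ | hp
    · have := h.1 q hq
      simp only []
      omega
    · exact ih h.2 p hp

lemma pvHalf_eq (ns fs : String) : pvHalfA ns fs = pvHalfB ns fs := by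
  unfold pvHalfA pvHalfB
  dsimp only
  rw [pvDedupA_eq]
  have hnd : (PySem.List.dedup ns.toList).Nodup := PySem.List.nodup_dedup ns.toList
  rw [pvInitA_eq _ hnd, pvOuterA_eq, pvEventsB_eq, pvPairsB_eq, pvFoldA_tbl]
  have hnn : ∀ p ∈ pvU (evR fs.toList 0 0), 0 ≤ p.2 :=
    pvU_nonneg _ (evR_pairwise fs.toList 0 0 le_rfl)
  unfold pvTbl
  simp only [List.map_map]
  apply List.map_congr_left
  intro r _
  simp only [Function.comp]
  congr 1
  simp only [List.map_map]
  apply List.map_congr_left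
  intro c _
  simp only [Function.comp]
  congr 1
  rw [PySem.Dict.getD_eq_get?_getD, pvFoldB_get?]
  rw [PySem.Dict.get?_empty]
  exact pvCell_eq _ hnn (r, c) (-1) none (Or.inl ⟨rfl, rfl⟩)

-- ===== VERDICT (by name: the statement is the Claim_ definition above) =====
theorem distance_matrices_spec : Claim_equal_distance_matrices := by
  intro np fp _ _
  unfold Spec_distance_matrices distance_matrices distance_matrices_alt
  simp [pvHalf_eq]
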